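-- pv_equiv track=rewrite | github.com/sjanoe123/healthcare-payment-integrity | backend/connectors/file/parsers/csv_parser.py | _normalize_field_name
-- ===== SOURCE A (Python) =====
-- def _normalize_field_name(name: str) -> str:
--     """Normalize a field name.
--
--     Args:
--         name: Original field name
--
--     Returns:
--         Normalized name (lowercase, underscores)
--     """
--     if not name:
--         return "unnamed"
--
--     # Strip whitespace
--     name = name.strip()
--
--     # Replace spaces and special chars with underscores
--     normalized = ""
--     for char in name:
--         if char.isalnum():
--             normalized += char.lower()
--         elif char in " -_":
--             normalized += "_"
--
--     # Remove consecutive underscores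
--     while "__" in normalized:
--         normalized = normalized.replace("__", "_")
--
--     return normalized.strip("_") or "unnamed"
-- ===== SOURCE B (Python) =====
-- def _normalize_field_name(name: str) -> str:
--     """Normalize a field name to a lowercase underscore-separated slug."""
--     if not name:
--         return "unnamed"
--
--     tokens = []
--     buf = []
--     for ch in name.strip():
--         if ch.isalnum():
--             buf.append(ch.lower())
--         elif ch in " -_":
--             if buf:
--                 tokens.append("".join(buf))
--             buf = []
--         # any other char: dropped, does not split a token
--     if buf:
--         tokens.append("".join(buf))
--
--     return "_".join(tokens) or "unnamed"
-- ===== Notes on version B (the rewrite author's own statement) =====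
-- stated objective: simpler
-- what changed: Replaces A's emit-markers-then-fix pipeline (build a string with separator markers, repeatedly run replace until no doubled marker remains, then strip the ends) with a single pass that splits the name into alphanumeric tokens via a current-token buffer and joins the tokens, so the while-collapse loop and the final strip pass disappear.
import Mathlib
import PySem

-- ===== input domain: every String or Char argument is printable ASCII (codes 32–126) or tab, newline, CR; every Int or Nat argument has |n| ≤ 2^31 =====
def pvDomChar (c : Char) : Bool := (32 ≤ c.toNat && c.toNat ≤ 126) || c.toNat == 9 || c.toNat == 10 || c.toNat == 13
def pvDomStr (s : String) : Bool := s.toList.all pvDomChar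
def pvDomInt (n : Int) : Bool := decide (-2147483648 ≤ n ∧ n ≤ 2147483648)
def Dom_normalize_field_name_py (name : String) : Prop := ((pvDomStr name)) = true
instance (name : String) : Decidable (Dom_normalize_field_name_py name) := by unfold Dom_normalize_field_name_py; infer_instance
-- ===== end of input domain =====

-- B replaces A's emit-then-collapse-then-strip pipeline by a one-pass token-buffer split-and-join; proved equal on all inputs.

-- ===== PORT A =====
-- spec of Python's s.replace("__", "_"), needed to prove termination of A's while-loop
def pvRdd : List Char → List Char
  | [] => []
  | [c] => [c]
  | c :: d :: t => if c = '_' ∧ d = '_' then '_' :: pvRdd t else c :: pvRdd (d :: t)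

theorem pvGo_eq (fuel : Nat) : ∀ (l acc : List Char), l.length ≤ fuel →
    PySem.Chars.replace.go ['_','_'] ['_'] fuel l acc = acc.reverse ++ pvRdd l := by
  induction fuel with
  | zero =>
    intro l acc hl
    have hnil : l = [] := List.eq_nil_of_length_eq_zero (Nat.le_zero.mp hl)
    subst hnil
    rw [PySem.Chars.replace.go]
    simp [pvRdd]
  | succ n ih =>
    intro l acc hl
    match l with
    | [] =>
      rw [PySem.Chars.replace.go] <;> simp [pvRdd]
    | c :: t =>
      rw [PySem.Chars.replace.go]
      by_cases hp : ['_','_'].isPrefixOf (c :: t) = true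
      · have hshape : c = '_' ∧ ∃ t2, t = '_' :: t2 := by
          cases t with
          | nil => simp [List.isPrefixOf] at hp
          | cons d t2 =>
            simp [List.isPrefixOf] at hp
            exact ⟨hp.1.symm, t2, by rw [← hp.2]⟩
        obtain ⟨rfl, t2, rfl⟩ := hshape
        rw [if_pos hp]
        have ht2 : t2.length ≤ n := by simp at hl; omega
        have hdrop : List.drop (['_','_'] : List Char).length ('_' :: '_' :: t2) = t2 := by simp
        rw [hdrop, ih _ _ ht2]
        simp [pvRdd]
      · rw [if_neg hp]
        have hlen : t.length ≤ n := by simp at hl; omega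
        rw [ih t (c :: acc) hlen]
        have hr : pvRdd (c :: t) = c :: pvRdd t := by
          cases t with
          | nil => simp [pvRdd]
          | cons d t2 =>
            have hnot : ¬ (c = '_' ∧ d = '_') := by
              rintro ⟨rfl, rfl⟩
              simp [List.isPrefixOf] at hp
            simp [pvRdd, hnot]
        rw [hr]
        simp

theorem pvReplace_dd (s : List Char) : PySem.Chars.replace s ['_','_'] ['_'] = pvRdd s := by
  unfold PySem.Chars.replace
  rw [if_neg (by simp)]
  rw [pvGo_eq s.length s [] le_rfl]
  simp

theorem pvRdd_length_le (s : List Char) : (pvRdd s).length ≤ s.length := by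
  induction s using pvRdd.induct with
  | case1 => simp [pvRdd]
  | case2 c => simp [pvRdd]
  | case3 c d t h ih => simp [pvRdd, h]; omega
  | case4 c d t h ih => simp only [pvRdd, if_neg h]; simp at ih ⊢; omega

theorem pvRdd_length_lt (s : List Char) (h : ['_','_'] <:+: s) : (pvRdd s).length < s.length := by
  induction s using pvRdd.induct with
  | case1 => exact absurd h.length_le (by simp)
  | case2 c => exact absurd h.length_le (by simp)
  | case3 c d t hcd ih =>
    obtain ⟨rfl, rfl⟩ := hcd
    have := pvRdd_length_le t
    simp [pvRdd]
    omega
  | case4 c d t hcd ih =>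
    have htail : ['_','_'] <:+: (d :: t) := by
      rcases List.infix_cons_iff.mp h with hpre | htl
      · exfalso
        obtain ⟨r, hr⟩ := hpre
        injection hr with h1 hr2
        injection hr2 with h2 _
        subst h1; subst h2
        simp at hcd
      · exact htl
    have := ih htail
    simp only [pvRdd, if_neg hcd]
    simp at this ⊢
    omega

def pvEmitStep (acc : List Char) (c : Char) : List Char :=
  if PySem.Chars.isalnum c then acc ++ [PySem.Chars.lowerChar c]
  else if PySem.Chars.isIn [c] [' ', '-', '_'] then acc ++ ['_']
  else acc

-- the 'while "__" in normalized: normalized = normalized.replace("__", "_")' loop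
def pvCollapse (s : List Char) : List Char :=
  if _h : PySem.Chars.isIn ['_','_'] s = true then
    pvCollapse (PySem.Chars.replace s ['_','_'] ['_'])
  else s
termination_by s.length
decreasing_by
  rw [pvReplace_dd]
  exact pvRdd_length_lt _ ((PySem.Chars.isIn_iff_infix _ _).mp _h)

def normalize_field_name_py (name : String) : String :=
  if name = "" then "unnamed"
  else
    let stripped := PySem.Chars.strip name.toList
    let normalized := stripped.foldl pvEmitStep []
    let collapsed := pvCollapse normalized
    let result := PySem.Chars.stripChars collapsed ['_']
    if result = [] then "unnamed" else String.ofList result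

-- ===== PORT B =====
def pvBStep (st : List (List Char) × List Char) (c : Char) : List (List Char) × List Char :=
  if PySem.Chars.isalnum c then (st.1, st.2 ++ [PySem.Chars.lowerChar c])
  else if PySem.Chars.isIn [c] [' ', '-', '_'] then
    ((if st.2 = [] then st.1 else st.1 ++ [st.2]), [])
  else st

def normalize_field_name_py_alt (name : String) : String :=
  if name = "" then "unnamed"
  else
    let p := (PySem.Chars.strip name.toList).foldl pvBStep ([], [])
    let toks := if p.2 = [] then p.1 else p.1 ++ [p.2]
    let res := PySem.Chars.join ['_'] toks
    if res = [] then "unnamed" else String.ofList res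

-- ===== PRECONDITION & SPEC =====
def Spec_normalize_field_name_py (name : String) (out : String) : Prop := out = normalize_field_name_py_alt name
instance (name : String) (out : String) : Decidable (Spec_normalize_field_name_py name out) := by unfold Spec_normalize_field_name_py; infer_instance

-- ===== CLAIM (what is proved, stated in full; the proofs are below) =====
def Claim_equal_normalize_field_name_py : Prop := ∀ (name : String), Dom_normalize_field_name_py name → Spec_normalize_field_name_py name (normalize_field_name_py name)

-- ===== LEMMAS AND PROOFS =====

-- the emitted fragment per input character (A's loop body and B's classification share these conditions)
def pvG (c : Char) : List Char :=
  if PySem.Chars.isalnum c then [PySem.Chars.lowerChar c]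
  else if PySem.Chars.isIn [c] [' ', '-', '_'] then ['_']
  else []

-- canonical single-pass collapse of consecutive underscores
def pvCC : List Char → List Char
  | [] => []
  | [c] => [c]
  | c :: d :: t => if c = '_' ∧ d = '_' then pvCC (d :: t) else c :: pvCC (d :: t)

-- maximal runs of non-underscore characters
def pvGrps (s : List Char) : List (List Char) :=
  match s with
  | [] => []
  | c :: t =>
    if c = '_' then pvGrps t
    else (c :: t.takeWhile (· ≠ '_')) :: pvGrps (t.dropWhile (· ≠ '_'))
termination_by s.length
decreasing_by
  · simp only [List.length_cons]; omega
  · simp only [List.length_cons]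
    have h := List.length_dropWhile_le (p := (· ≠ '_')) (l := t)
    omega

-- B's token accumulator, as a recursion over the input
def pvGrpsPre (buf : List Char) : List Char → List (List Char)
  | [] => if buf = [] then [] else [buf]
  | c :: cs =>
    if PySem.Chars.isalnum c then pvGrpsPre (buf ++ [PySem.Chars.lowerChar c]) cs
    else if PySem.Chars.isIn [c] [' ', '-', '_'] then
      (if buf = [] then [] else [buf]) ++ pvGrpsPre [] cs
    else pvGrpsPre buf cs

def pvP (c : Char) : Bool := List.contains ['_'] c
def pvLst (s : List Char) : List Char := s.dropWhile pvP
def pvRst (s : List Char) : List Char := (s.reverse.dropWhile pvP).reverse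

theorem pvP_iff (c : Char) : pvP c = true ↔ c = '_' := by simp [pvP]

theorem pvStripChars_eq (s : List Char) :
    PySem.Chars.stripChars s ['_'] = pvRst (pvLst s) := by rfl

theorem pvLower_ne (c : Char) (h : PySem.Chars.isalnum c = true) :
    PySem.Chars.lowerChar c ≠ '_' := by
  intro hc
  unfold PySem.Chars.lowerChar at hc
  split at hc
  · rename_i hup
    unfold PySem.Chars.isupper at hup
    simp only [Bool.and_eq_true, decide_eq_true_eq, Char.le_def,
      UInt32.le_iff_toNat_le] at hup
    have hZ : ('Z' : Char).val.toNat = 90 := by decide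
    have hA : ('A' : Char).val.toNat = 65 := by decide
    have hb : 65 ≤ c.toNat ∧ c.toNat ≤ 90 := by unfold Char.toNat; omega
    have hv : (c.toNat + 32).isValidChar := Or.inl (by omega)
    have h2 := congrArg Char.toNat hc
    rw [Char.toNat_ofNat, if_pos hv] at h2
    have hU : ('_' : Char).toNat = 95 := by decide
    omega
  · rw [hc] at h
    exact absurd h (by decide)

theorem pvCC_cons (c : Char) (x : List Char) :
    pvCC (c :: x) = if c = '_' ∧ x.head? = some '_' then pvCC x else c :: pvCC x := by
  cases x with
  | nil => simp [pvCC]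
  | cons d t => simp [pvCC]

theorem pvRdd_head? (s : List Char) : (pvRdd s).head? = s.head? := by
  induction s using pvRdd.induct with
  | case1 => rfl
  | case2 c => rfl
  | case3 c d t h ih => obtain ⟨rfl, rfl⟩ := h; simp [pvRdd]
  | case4 c d t h ih => simp only [pvRdd, if_neg h]; rfl

theorem pvCC_rdd (s : List Char) : pvCC (pvRdd s) = pvCC s := by
  induction s using pvRdd.induct with
  | case1 => rfl
  | case2 c => rfl
  | case3 c d t h ih =>
    obtain ⟨rfl, rfl⟩ := h
    have h1 : pvRdd ('_' :: '_' :: t) = '_' :: pvRdd t := by simp [pvRdd]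
    have h2 : pvCC ('_' :: '_' :: t) = pvCC ('_' :: t) := by simp [pvCC]
    rw [h1, h2, pvCC_cons, pvCC_cons, pvRdd_head?]
    split_ifs with hh
    · exact ih
    · rw [ih]
  | case4 c d t h ih =>
    have h1 : pvRdd (c :: d :: t) = c :: pvRdd (d :: t) := by simp only [pvRdd, if_neg h]
    have hhd : (pvRdd (d :: t)).head? = some d := by rw [pvRdd_head?]; rfl
    rw [h1, pvCC_cons, hhd]
    have hcond : ¬ (c = '_' ∧ some d = some '_') := by
      intro ⟨hc, hd⟩
      exact h ⟨hc, by injection hd⟩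
    rw [if_neg hcond, ih]
    have h2 : pvCC (c :: d :: t) = c :: pvCC (d :: t) := by simp only [pvCC, if_neg h]
    rw [h2]

theorem pvCC_of_no_dd (s : List Char) (h : ¬ ['_','_'] <:+: s) : pvCC s = s := by
  induction s using pvCC.induct with
  | case1 => rfl
  | case2 c => rfl
  | case3 c d t hcd ih =>
    exfalso
    obtain ⟨rfl, rfl⟩ := hcd
    exact h ⟨[], t, rfl⟩
  | case4 c d t hcd ih =>
    have htail : ¬ ['_','_'] <:+: (d :: t) := fun hx => h (List.infix_cons_iff.mpr (Or.inr hx))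
    simp only [pvCC, if_neg hcd]
    rw [ih htail]

theorem pvCollapse_eq_cc (s : List Char) : pvCollapse s = pvCC s := by
  induction s using pvCollapse.induct with
  | case1 s h ih =>
    rw [pvCollapse, dif_pos h, ih, pvReplace_dd, pvCC_rdd]
  | case2 s h =>
    rw [pvCollapse, dif_neg h]
    have : ¬ ['_','_'] <:+: s := by
      intro hx
      exact h ((PySem.Chars.isIn_iff_infix _ _).mpr hx)
    rw [pvCC_of_no_dd s this]

theorem pvRst_cons (c : Char) (t : List Char) :
    pvRst (c :: t) = if pvRst t = [] then (if pvP c then [] else [c]) else c :: pvRst t := by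
  unfold pvRst
  simp only [List.reverse_cons, List.dropWhile_append]
  by_cases h : t.reverse.dropWhile pvP = []
  · rw [h]
    simp only [List.isEmpty_nil, List.reverse_nil, List.dropWhile]
    cases hp : pvP c <;> simp
  · have hne : (t.reverse.dropWhile pvP).isEmpty = false := by
      simpa [List.isEmpty_iff] using h
    rw [hne]
    simp [h]

theorem pvLst_rst_comm (s : List Char) : pvLst (pvRst s) = pvRst (pvLst s) := by
  induction s with
  | nil => rfl
  | cons c t ih =>
    by_cases hp : pvP c = true
    · have hl : pvLst (c :: t) = pvLst t := by simp [pvLst, hp]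
      rw [hl, ← ih, pvRst_cons]
      by_cases hz : pvRst t = []
      · rw [if_pos hz, if_pos hp, hz]
      · rw [if_neg hz]
        simp [pvLst, hp]
    · have hl : pvLst (c :: t) = c :: t := by simp [pvLst, hp]
      rw [hl, pvRst_cons]
      by_cases hz : pvRst t = []
      · rw [if_pos hz, if_neg hp]
        simp [pvLst, hp]
      · rw [if_neg hz]
        simp [pvLst, hp]

theorem pvGrps_sound (s : List Char) : ∀ g ∈ pvGrps s, g ≠ [] ∧ ∀ c ∈ g, c ≠ '_' := by
  induction s using pvGrps.induct with
  | case1 => simp [pvGrps]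
  | case2 t ih =>
    intro g hg
    rw [pvGrps, if_pos rfl] at hg
    exact ih g hg
  | case3 c t hc ih =>
    intro g hg
    rw [pvGrps, if_neg hc] at hg
    rcases List.mem_cons.mp hg with rfl | hg
    · refine ⟨by simp, ?_⟩
      intro x hx
      rcases List.mem_cons.mp hx with rfl | hx
      · exact hc
      · simpa using List.mem_takeWhile_imp hx
    · exact ih g hg

theorem pvJoin_ne_nil (s : List Char) (h : pvGrps s ≠ []) :
    PySem.Chars.join ['_'] (pvGrps s) ≠ [] := by
  cases hg : pvGrps s with
  | nil => exact absurd hg h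
  | cons g gs =>
    have hgne : g ≠ [] := (pvGrps_sound s g (by rw [hg]; simp)).1
    obtain ⟨a, g', rfl⟩ : ∃ a g', g = a :: g' := by
      cases g with
      | nil => exact absurd rfl hgne
      | cons a g' => exact ⟨a, g', rfl⟩
    cases gs with
    | nil => rw [PySem.Chars.join_singleton]; simp
    | cons g2 gs2 => rw [PySem.Chars.join_cons_cons]; simp

theorem pvLst_join (s : List Char) :
    pvLst (PySem.Chars.join ['_'] (pvGrps s)) = PySem.Chars.join ['_'] (pvGrps s) := by
  cases hg : pvGrps s with
  | nil => rw [PySem.Chars.join_nil]; rfl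
  | cons g gs =>
    obtain ⟨hgne, hch⟩ := pvGrps_sound s g (by rw [hg]; simp)
    obtain ⟨a, g', rfl⟩ : ∃ a g', g = a :: g' := by
      cases g with
      | nil => exact absurd rfl hgne
      | cons a g' => exact ⟨a, g', rfl⟩
    have ha : ¬ pvP a = true := by
      rw [pvP_iff]
      exact hch a (by simp)
    cases gs with
    | nil =>
      rw [PySem.Chars.join_singleton]
      simp [pvLst, ha]
    | cons g2 gs2 =>
      rw [PySem.Chars.join_cons_cons]
      simp [pvLst, ha]

theorem pvCC_run_prefix (p r : List Char) (hp : ∀ c ∈ p, c ≠ '_') :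
    pvCC (p ++ r) = p ++ pvCC r := by
  induction p with
  | nil => rfl
  | cons a p' ih =>
    have ha : a ≠ '_' := hp a (by simp)
    rw [List.cons_append, pvCC_cons, if_neg (fun h => ha h.1)]
    rw [ih (fun c hc => hp c (by simp [hc])), List.cons_append]

theorem pvRst_append (p r : List Char) (hp : ∀ c ∈ p, c ≠ '_') :
    pvRst (p ++ r) = p ++ pvRst r := by
  induction p with
  | nil => rfl
  | cons a p' ih =>
    have ha : ¬ pvP a = true := by
      rw [pvP_iff]
      exact hp a (by simp)
    have ih' := ih (fun c hc => hp c (by simp [hc]))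
    rw [List.cons_append, pvRst_cons, ih']
    by_cases hz : p' ++ pvRst r = []
    · rw [if_pos hz, if_neg ha]
      rcases List.append_eq_nil_iff.mp hz with ⟨rfl, h2⟩
      simp [h2]
    · rw [if_neg hz, List.cons_append]

theorem pvDropWhile_cons_underscore (t : List Char) (a : Char) (r2 : List Char)
    (h : List.dropWhile (fun x => decide (x ≠ '_')) t = a :: r2) : a = '_' := by
  induction t with
  | nil => simp at h
  | cons c t ih =>
    rw [List.dropWhile_cons] at h
    split at h
    · exact ih h
    · rename_i hc
      injection h with h1 _
      simp at hc
      rw [← h1]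
      exact hc

theorem pvM2 (s : List Char) :
    pvRst (pvCC s) =
      (if s.head? = some '_' ∧ pvGrps s ≠ [] then ['_'] else []) ++ PySem.Chars.join ['_'] (pvGrps s) := by
  induction s using pvGrps.induct with
  | case1 => simp [pvCC, pvGrps, pvRst, PySem.Chars.join_nil]
  | case2 t ih =>
    have hgr : pvGrps ('_' :: t) = pvGrps t := by rw [pvGrps, if_pos rfl]
    rw [hgr, pvCC_cons]
    by_cases hh : t.head? = some '_'
    · rw [if_pos ⟨rfl, hh⟩, ih]
      simp [hh]
    · rw [if_neg (fun h => hh h.2), pvRst_cons, ih]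
      by_cases hge : pvGrps t = []
      · simp [hge, PySem.Chars.join_nil, pvP, hh]
      · have hne : (if t.head? = some '_' ∧ pvGrps t ≠ [] then ['_'] else []) ++
            PySem.Chars.join ['_'] (pvGrps t) ≠ [] := by
          intro hx
          rcases List.append_eq_nil_iff.mp hx with ⟨_, h2⟩
          exact pvJoin_ne_nil t hge h2
        rw [if_neg hne]
        simp [hh, hge]
  | case3 c t hc ih =>
    have hgr : pvGrps (c :: t)
        = (c :: t.takeWhile (· ≠ '_')) :: pvGrps (t.dropWhile (· ≠ '_')) := by
      rw [pvGrps, if_neg hc]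
    have hcw : ∀ x ∈ c :: t.takeWhile (· ≠ '_'), x ≠ '_' := by
      intro x hx
      rcases List.mem_cons.mp hx with rfl | hx
      · exact hc
      · simpa using List.mem_takeWhile_imp hx
    have hsplit : c :: t = (c :: t.takeWhile (· ≠ '_')) ++ t.dropWhile (· ≠ '_') := by
      rw [List.cons_append, List.takeWhile_append_dropWhile]
    have hcc : pvCC (c :: t) = (c :: t.takeWhile (· ≠ '_')) ++ pvCC (t.dropWhile (· ≠ '_')) := by
      conv_lhs => rw [hsplit]
      exact pvCC_run_prefix _ _ hcw
    rw [hcc, pvRst_append _ _ hcw, ih, hgr]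
    have hhd : ¬ ((c :: t).head? = some '_' ∧
        ((c :: t.takeWhile (· ≠ '_')) :: pvGrps (t.dropWhile (· ≠ '_'))) ≠ ([] : List (List Char))) := by
      intro hx
      have h1 := hx.1
      simp at h1
      exact hc h1
    rw [if_neg hhd, List.nil_append]
    rcases hrshape : t.dropWhile (· ≠ '_') with _ | ⟨a, r2⟩
    · simp [pvGrps, PySem.Chars.join_nil, PySem.Chars.join_singleton]
    · have ha : a = '_' := pvDropWhile_cons_underscore t a r2 hrshape
      subst ha
      by_cases hge : pvGrps ('_' :: r2) = []
      · simp [hge, PySem.Chars.join_nil, PySem.Chars.join_singleton]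
      · rw [if_pos ⟨by simp, hge⟩]
        cases hgg : pvGrps ('_' :: r2) with
        | nil => exact absurd hgg hge
        | cons g gs =>
          rw [PySem.Chars.join_cons_cons]
          simp [List.append_assoc]

theorem pvTake_run (bt x : List Char) (hb : ∀ c ∈ bt, c ≠ '_') :
    (bt ++ '_' :: x).takeWhile (· ≠ '_') = bt ∧ (bt ++ '_' :: x).dropWhile (· ≠ '_') = '_' :: x := by
  induction bt with
  | nil => simp
  | cons b bt ih =>
    have hb1 : b ≠ '_' := hb b (by simp)
    obtain ⟨h1, h2⟩ := ih (fun c hc => hb c (by simp [hc]))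
    constructor
    · rw [List.cons_append, List.takeWhile_cons, if_pos (by simpa using hb1), h1]
    · rw [List.cons_append, List.dropWhile_cons, if_pos (by simpa using hb1), h2]

theorem pvGrps_run (buf : List Char) (hb : ∀ c ∈ buf, c ≠ '_') :
    pvGrps buf = if buf = [] then [] else [buf] := by
  cases buf with
  | nil => simp [pvGrps]
  | cons b bt =>
    rw [pvGrps, if_neg (hb b (by simp))]
    have hd : bt.dropWhile (· ≠ '_') = [] :=
      List.dropWhile_eq_nil_iff.mpr (fun x hx => by simpa using hb x (by simp [hx]))
    have ht : bt.takeWhile (· ≠ '_') = bt := by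
      have := List.takeWhile_append_dropWhile (p := (· ≠ '_')) (l := bt)
      rw [hd, List.append_nil] at this
      exact this
    rw [ht, hd]
    simp [pvGrps]

theorem pvGrps_run_sep (buf x : List Char) (hb : ∀ c ∈ buf, c ≠ '_') :
    pvGrps (buf ++ '_' :: x) = (if buf = [] then [] else [buf]) ++ pvGrps x := by
  cases buf with
  | nil =>
    rw [List.nil_append, pvGrps, if_pos rfl]
    simp
  | cons b bt =>
    obtain ⟨h1, h2⟩ := pvTake_run bt x (fun c hc => hb c (by simp [hc]))
    rw [List.cons_append, pvGrps, if_neg (hb b (by simp)), h1, h2]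
    have hx : pvGrps ('_' :: x) = pvGrps x := by rw [pvGrps, if_pos rfl]
    rw [hx]
    simp

theorem pvEmitStep_g (acc : List Char) (c : Char) : pvEmitStep acc c = acc ++ pvG c := by
  unfold pvEmitStep pvG
  split_ifs <;> simp

theorem pvFoldl_emit (cs : List Char) : ∀ acc, cs.foldl pvEmitStep acc = acc ++ cs.flatMap pvG := by
  induction cs with
  | nil => intro acc; simp
  | cons c cs ih =>
    intro acc
    rw [List.foldl_cons, ih, pvEmitStep_g, List.flatMap_cons, List.append_assoc]

theorem pvFoldl_b (cs : List Char) : ∀ toks buf,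
    (if (cs.foldl pvBStep (toks, buf)).2 = [] then (cs.foldl pvBStep (toks, buf)).1
     else (cs.foldl pvBStep (toks, buf)).1 ++ [(cs.foldl pvBStep (toks, buf)).2]) =
    toks ++ pvGrpsPre buf cs := by
  induction cs with
  | nil =>
    intro toks buf
    show (if buf = [] then toks else toks ++ [buf]) = toks ++ pvGrpsPre buf []
    unfold pvGrpsPre
    split_ifs <;> simp
  | cons c cs ih =>
    intro toks buf
    rw [List.foldl_cons]
    by_cases h1 : PySem.Chars.isalnum c = true
    · rw [show pvBStep (toks, buf) c = (toks, buf ++ [PySem.Chars.lowerChar c]) from by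
        simp [pvBStep, h1]]
      rw [ih]
      rw [show pvGrpsPre buf (c :: cs) = pvGrpsPre (buf ++ [PySem.Chars.lowerChar c]) cs from by
        simp [pvGrpsPre, h1]]
    · by_cases h2 : PySem.Chars.isIn [c] [' ', '-', '_'] = true
      · rw [show pvBStep (toks, buf) c = ((if buf = [] then toks else toks ++ [buf]), []) from by
          simp [pvBStep, h1, h2]]
        rw [ih]
        rw [show pvGrpsPre buf (c :: cs) = (if buf = [] then [] else [buf]) ++ pvGrpsPre [] cs from by
          simp [pvGrpsPre, h1, h2]]
        by_cases h3 : buf = [] <;> simp [h3]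
      · rw [show pvBStep (toks, buf) c = (toks, buf) from by simp [pvBStep, h1, h2]]
        rw [ih]
        rw [show pvGrpsPre buf (c :: cs) = pvGrpsPre buf cs from by simp [pvGrpsPre, h1, h2]]

theorem pvGrpsPre_eq (cs : List Char) : ∀ buf, (∀ c ∈ buf, c ≠ '_') →
    pvGrpsPre buf cs = pvGrps (buf ++ cs.flatMap pvG) := by
  induction cs with
  | nil =>
    intro buf hb
    simp only [List.flatMap_nil, List.append_nil]
    rw [pvGrps_run buf hb]
    rfl
  | cons c cs ih =>
    intro buf hb
    by_cases h1 : PySem.Chars.isalnum c = true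
    · have hlc : PySem.Chars.lowerChar c ≠ '_' := pvLower_ne c h1
      have hb' : ∀ x ∈ buf ++ [PySem.Chars.lowerChar c], x ≠ '_' := by
        intro x hx
        rcases List.mem_append.mp hx with hx | hx
        · exact hb x hx
        · simp at hx; subst hx; exact hlc
      rw [show pvGrpsPre buf (c :: cs) = pvGrpsPre (buf ++ [PySem.Chars.lowerChar c]) cs from by
        simp [pvGrpsPre, h1]]
      rw [ih _ hb']
      rw [show (c :: cs).flatMap pvG = [PySem.Chars.lowerChar c] ++ cs.flatMap pvG from by
        simp [pvG, h1]]
      simp [List.append_assoc]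
    · by_cases h2 : PySem.Chars.isIn [c] [' ', '-', '_'] = true
      · rw [show pvGrpsPre buf (c :: cs) = (if buf = [] then [] else [buf]) ++ pvGrpsPre [] cs from by
          simp [pvGrpsPre, h1, h2]]
        rw [ih [] (by simp)]
        rw [show (c :: cs).flatMap pvG = '_' :: cs.flatMap pvG from by simp [pvG, h1, h2]]
        rw [pvGrps_run_sep buf _ hb]
        simp
      · rw [show pvGrpsPre buf (c :: cs) = pvGrpsPre buf cs from by simp [pvGrpsPre, h1, h2]]
        rw [ih buf hb]
        rw [show (c :: cs).flatMap pvG = cs.flatMap pvG from by simp [pvG, h1, h2]]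

theorem pvMain (cs : List Char) :
    PySem.Chars.stripChars (pvCollapse (cs.foldl pvEmitStep [])) ['_'] =
      PySem.Chars.join ['_']
        (if (cs.foldl pvBStep ([], [])).2 = [] then (cs.foldl pvBStep ([], [])).1
         else (cs.foldl pvBStep ([], [])).1 ++ [(cs.foldl pvBStep ([], [])).2]) := by
  rw [pvFoldl_b cs [] [], List.nil_append, pvGrpsPre_eq cs [] (by simp), List.nil_append]
  rw [pvFoldl_emit cs [], List.nil_append]
  rw [pvStripChars_eq, pvCollapse_eq_cc, ← pvLst_rst_comm, pvM2]
  by_cases h : (cs.flatMap pvG).head? = some '_' ∧ pvGrps (cs.flatMap pvG) ≠ []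
  · rw [if_pos h, List.singleton_append]
    rw [show pvLst ('_' :: PySem.Chars.join ['_'] (pvGrps (cs.flatMap pvG)))
        = pvLst (PySem.Chars.join ['_'] (pvGrps (cs.flatMap pvG))) from by
      simp [pvLst, pvP]]
    exact pvLst_join _
  · rw [if_neg h, List.nil_append]
    exact pvLst_join _

-- ===== VERDICT (by name: the statement is the Claim_ definition above) =====
theorem normalize_field_name_py_spec : Claim_equal_normalize_field_name_py := by
  intro name _
  unfold Spec_normalize_field_name_py normalize_field_name_py normalize_field_name_py_alt
  by_cases hname : name = ""
  · simp [hname]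
  · simp only [hname]
    rw [pvMain (PySem.Chars.strip name.toList)]
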